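-- pv_equiv track=rewrite | github.com/Ananta-dot/misr_new | mistr_runner.py | motif_seeds
-- ===== SOURCE A (Python) =====
-- from typing import Dict, List, Tuple
--
-- Seq = List[int]
--
-- def motif_rainbow(n: int) -> Seq:
--     # [1,2,...,n, n,...,2,1]
--     return list(range(1, n+1)) + list(range(n, 0, -1))
--
-- def motif_doubled(n: int) -> Seq:
--     # [1,1,2,2,...,n,n]
--     out=[]
--     for i in range(1, n+1):
--         out += [i,i]
--     return out
--
-- def motif_interleave(n: int) -> Seq:
--     # [1,2,1,2, 3,4,3,4, ...]
--     out=[]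
--     for i in range(1, n+1, 2):
--         j = i+1 if i+1<=n else i
--         out += [i, j, i, j]
--     # ensure exactly two per label
--     cnt = {i:0 for i in range(1,n+1)}
--     fixed=[]
--     for x in out:
--         if cnt[x] < 2:
--             fixed.append(x); cnt[x]+=1
--     for i in range(1,n+1):
--         while cnt[i] < 2:
--             fixed.append(i); cnt[i]+=1
--     return fixed[:2*n]
--
-- def motif_zipper(n: int) -> Seq:
--     # [1,n,1,n, 2,n-1,2,n-1, ...] (corner-ish)
--     out=[]
--     for i in range(1, (n//2)+1):
--         j = n - i + 1
--         out += [i, j, i, j]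
--     if n % 2 == 1:
--         k = (n//2)+1
--         out += [k,k]
--     return out[:2*n]
--
-- def motif_ladder(n: int) -> Seq:
--     # spreads endpoints to create corner stacks
--     out=[]
--     a, b = 1, 2
--     while len(out) < 2*n:
--         out += [a, b if b<=n else a]
--         a += 1
--         b += 1
--         if a > n: a = n
--         if b > n: b = n
--     # adjust counts to exactly two per label
--     cnt = {i:0 for i in range(1,n+1)}
--     fixed=[]
--     for x in out:
--         if cnt[x] < 2:
--             fixed.append(x); cnt[x]+=1
--     for i in range(1,n+1):
--         while cnt[i] < 2:
--             fixed.append(i); cnt[i]+=1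
--     return fixed[:2*n]
--
-- def motif_seeds(n: int) -> List[Seq]:
--     S = [
--         motif_rainbow(n),
--         motif_doubled(n),
--         motif_interleave(n),
--         motif_zipper(n),
--         motif_ladder(n),
--         list(range(1, n+1)) + list(range(1, n+1)),  # [1..n,1..n]
--         [x for pair in zip(range(1,n+1), range(1,n+1)) for x in pair],  # 1,1,2,2,...
--     ]
--     out=[]
--     for s in S:
--         if len(s)==2*n and all(s.count(i)==2 for i in range(1,n+1)):
--             out.append(s)
--     return out
-- ===== SOURCE B (Python) =====
-- from typing import Dict, List, Tuple
--
-- Seq = List[int]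
--
-- # B: each motif is built by a direct closed-form comprehension (position/label
-- # formulas) instead of append loops + count-fixing passes, and the validation is
-- # one sort-and-compare against the target multiset instead of per-label scans.
--
-- def _two_of_each(ks) -> Seq:
--     return [x for k in ks for x in (k, k)]
--
-- def motif_seeds(n: int) -> List[Seq]:
--     rainbow = [k if k <= n else 2 * n + 1 - k for k in range(1, 2 * n + 1)]
--     doubled = _two_of_each(range(1, n + 1))
--     inter = ([x for i in range(1, n, 2) for x in (i, i + 1, i, i + 1)]
--              + ([n, n] if n % 2 else []))
--     zipper = ([x for i in range(1, n // 2 + 1) for x in (i, n - i + 1, i, n - i + 1)]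
--               + ([n // 2 + 1] * 2 if n % 2 else []))
--     ladder = [1] + _two_of_each(range(2, n + 1)) + [1] if n >= 1 else []
--     straight = list(range(1, n + 1)) * 2
--     S = [rainbow, doubled, inter, zipper, ladder, straight, doubled]
--     expected = sorted(straight)
--     return [s for s in S if sorted(s) == expected]
-- ===== Notes on version B (the rewrite author's own statement) =====
-- stated objective: faster
-- what changed: B replaces every append-loop/count-fixing motif builder with a direct closed-form comprehension (position and label formulas) and validates each candidate with a single sort-and-compare against the target multiset instead of scanning it once per label with s.count(i).
-- outside the precondition, e.g. on motif_seeds(-1): A returns [], B returns [[], [], [], [], []]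
import Mathlib
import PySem

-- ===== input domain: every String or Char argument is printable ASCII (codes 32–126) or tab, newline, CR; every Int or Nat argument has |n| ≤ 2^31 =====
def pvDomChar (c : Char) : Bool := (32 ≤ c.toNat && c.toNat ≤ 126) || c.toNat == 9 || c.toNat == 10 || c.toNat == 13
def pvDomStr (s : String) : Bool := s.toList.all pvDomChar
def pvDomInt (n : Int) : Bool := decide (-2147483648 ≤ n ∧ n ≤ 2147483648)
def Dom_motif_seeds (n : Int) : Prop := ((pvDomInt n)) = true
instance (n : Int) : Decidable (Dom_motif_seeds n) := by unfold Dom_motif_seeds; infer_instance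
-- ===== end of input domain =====

-- B rebuilds every motif by a direct closed-form comprehension (no append loops, no
-- count-fixing passes) and validates with one sort-and-compare per candidate.

-- ===== PORT A =====
-- transliterations of Source A's motif_* builders

def motifRainbow (n : Int) : List Int :=
  PySem.List.pyRange 1 (n + 1) 1 ++ PySem.List.pyRange n 0 (-1)

def motifDoubled (n : Int) : List Int :=
  (PySem.List.pyRange 1 (n + 1) 1).foldl (fun out i => out ++ [i, i]) []

-- the body of the 'if cnt[x] < 2' scan of motif_interleave / motif_ladder
def keepStep (p : PySem.Dict Int Int × List Int) (x : Int) :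
    PySem.Dict Int Int × List Int :=
  if p.1.getD x 0 < 2 then (p.1.insert x (p.1.getD x 0 + 1), p.2 ++ [x]) else p

-- the 'while cnt[i] < 2' padding loop
def padWhile (cnt : PySem.Dict Int Int) (fixed : List Int) (i : Int) :
    PySem.Dict Int Int × List Int :=
  if _h : cnt.getD i 0 < 2 then
    padWhile (cnt.insert i (cnt.getD i 0 + 1)) (fixed ++ [i]) i
  else (cnt, fixed)
termination_by (2 - cnt.getD i 0).toNat
decreasing_by
  simp only [PySem.Dict.getD_insert_self]
  omega

-- the duplicated "adjust counts to exactly two per label" block, one helper.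
-- cnt[x] is read as getD _ _ 0: the key is always present (keys are 1..n and every
-- scanned value lies in 1..n), so this is exact.
def fixCounts (n : Int) (out : List Int) : List Int :=
  let cnt0 : PySem.Dict Int Int :=
    (PySem.List.pyRange 1 (n + 1) 1).foldl (fun d i => d.insert i 0) PySem.Dict.empty
  let st := out.foldl keepStep (cnt0, [])
  let st2 := (PySem.List.pyRange 1 (n + 1) 1).foldl (fun p i => padWhile p.1 p.2 i) st
  st2.2

def motifInterleave (n : Int) : List Int :=
  let out := (PySem.List.pyRange 1 (n + 1) 2).foldl
    (fun out i => let j := if i + 1 ≤ n then i + 1 else i; out ++ [i, j, i, j]) []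
  PySem.List.slice (fixCounts n out) none (some (2 * n))

def motifZipper (n : Int) : List Int :=
  let out := (PySem.List.pyRange 1 (PySem.Int.floordiv n 2 + 1) 1).foldl
    (fun out i => let j := n - i + 1; out ++ [i, j, i, j]) []
  let out := if PySem.Int.mod n 2 = 1 then
      (let k := PySem.Int.floordiv n 2 + 1; out ++ [k, k])
    else out
  PySem.List.slice out none (some (2 * n))

def ladderWhile (n : Int) (out : List Int) (a b : Int) : List Int :=
  if _h : (out.length : Int) < 2 * n then
    let out' := out ++ [a, if b ≤ n then b else a]
    let a' := a + 1
    let b' := b + 1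
    ladderWhile n out' (if a' > n then n else a') (if b' > n then n else b')
  else out
termination_by (2 * n - out.length).toNat
decreasing_by
  simp only [List.length_append, List.length_cons, List.length_nil]
  omega

def motifLadder (n : Int) : List Int :=
  let out := ladderWhile n [] 1 2
  PySem.List.slice (fixCounts n out) none (some (2 * n))

def motif_seeds (n : Int) : List (List Int) :=
  let S : List (List Int) := [
    motifRainbow n,
    motifDoubled n,
    motifInterleave n,
    motifZipper n,
    motifLadder n,
    PySem.List.pyRange 1 (n + 1) 1 ++ PySem.List.pyRange 1 (n + 1) 1,
    ((PySem.List.pyRange 1 (n + 1) 1).zip (PySem.List.pyRange 1 (n + 1) 1)).flatMap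
      (fun p => [p.1, p.2])]
  S.foldl
    (fun out s =>
      if PySem.List.len s == 2 * n
          && (PySem.List.pyRange 1 (n + 1) 1).all (fun i => PySem.List.count s i == 2)
      then out ++ [s] else out) []

-- ===== PORT B =====
-- transliterations of Source B's closed-form builders

def altTwoOfEach (ks : List Int) : List Int := ks.flatMap (fun k => [k, k])

def altRainbow (n : Int) : List Int :=
  (PySem.List.pyRange 1 (2 * n + 1) 1).map (fun k => if k ≤ n then k else 2 * n + 1 - k)

def altInterleave (n : Int) : List Int :=
  (PySem.List.pyRange 1 n 2).flatMap (fun i => [i, i + 1, i, i + 1])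
    ++ (if PySem.Int.mod n 2 ≠ 0 then [n, n] else [])

def altZipper (n : Int) : List Int :=
  (PySem.List.pyRange 1 (PySem.Int.floordiv n 2 + 1) 1).flatMap
      (fun i => [i, n - i + 1, i, n - i + 1])
    ++ (if PySem.Int.mod n 2 ≠ 0 then
          PySem.List.pyRepeat [PySem.Int.floordiv n 2 + 1] 2 else [])

def altLadder (n : Int) : List Int :=
  if 1 ≤ n then [1] ++ altTwoOfEach (PySem.List.pyRange 2 (n + 1) 1) ++ [1] else []

def motif_seeds_alt (n : Int) : List (List Int) :=
  let straight := PySem.List.pyRepeat (PySem.List.pyRange 1 (n + 1) 1) 2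
  let doubled := altTwoOfEach (PySem.List.pyRange 1 (n + 1) 1)
  let S : List (List Int) := [
    altRainbow n, doubled, altInterleave n, altZipper n, altLadder n, straight, doubled]
  let expected := PySem.List.sorted straight (fun x => x)
  S.filter (fun s => PySem.List.sorted s (fun x => x) == expected)

-- ===== PRECONDITION & SPEC =====
-- Pre_ restricts to the natural domain of a motif size, n ≥ 0: on negative n A's
-- len(s)==2*n test is vacuously false (it returns []) while B's sorted-compare keeps
-- the empty candidates.
def Pre_motif_seeds (n : Int) : Prop := 0 ≤ n
instance (n : Int) : Decidable (Pre_motif_seeds n) := by unfold Pre_motif_seeds; infer_instance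

def pvWitness_motif_seeds : Int := (3)

def Spec_motif_seeds (n : Int) (out : List (List Int)) : Prop := out = motif_seeds_alt n
instance (n : Int) (out : List (List Int)) : Decidable (Spec_motif_seeds n out) := by unfold Spec_motif_seeds; infer_instance

-- ===== CLAIM (what is proved, stated in full; the proofs are below) =====
def Claim_equal_motif_seeds : Prop :=
  ∀ (n : Int), Dom_motif_seeds n → Pre_motif_seeds n → Spec_motif_seeds n (motif_seeds n)

-- ===== LEMMAS AND PROOFS =====

theorem floordiv_two (n : Int) : PySem.Int.floordiv n 2 = n / 2 := by
  simp [PySem.Int.floordiv, Int.fdiv_eq_ediv]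

theorem mod_two (n : Int) : PySem.Int.mod n 2 = n % 2 := by
  simp [PySem.Int.mod, Int.fmod_eq_emod]

theorem zip_self_flatMap (l : List Int) :
    (l.zip l).flatMap (fun p => [p.1, p.2]) = l.flatMap (fun i => [i, i]) := by
  induction l with
  | nil => rfl
  | cons a t ih => simp [List.flatMap_cons, ih]

theorem pyRepeat_two (l : List Int) : PySem.List.pyRepeat l 2 = l ++ l := by
  simp [PySem.List.pyRepeat]

theorem append_self_perm_flatMap (l : List Int) :
    (l ++ l).Perm (l.flatMap (fun i => [i, i])) := by
  induction l with
  | nil => rfl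
  | cons a t ih =>
    show List.Perm (a :: (t ++ a :: t)) (a :: a :: t.flatMap (fun i => [i, i]))
    exact List.Perm.cons a (List.perm_middle.trans (List.Perm.cons a ih))

theorem flatMap_pair_pairwise (l : List Int) (h : l.Pairwise (· < ·)) :
    (l.flatMap (fun i => [i, i])).Pairwise (· ≤ ·) := by
  induction l with
  | nil => simp
  | cons a t ih =>
    rw [List.pairwise_cons] at h
    have key : ∀ x ∈ t.flatMap (fun i => [i, i]), a ≤ x := by
      intro x hx
      rcases List.mem_flatMap.mp hx with ⟨y, hy, hxy⟩
      have := h.1 y hy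
      simp at hxy
      omega
    simp only [List.flatMap_cons, List.cons_append, List.nil_append]
    refine List.Pairwise.cons ?_ (List.Pairwise.cons key (ih h.2))
    intro x hx
    rcases List.mem_cons.mp hx with rfl | hx
    · exact le_refl _
    · exact key x hx

theorem count_flatMap_pair (l : List Int) (hnd : l.Nodup) (x : Int) :
    (l.flatMap (fun i => [i, i])).count x = if x ∈ l then 2 else 0 := by
  induction l with
  | nil => simp
  | cons a t ih =>
    rw [List.nodup_cons] at hnd
    simp only [List.flatMap_cons, List.count_append, ih hnd.2, List.mem_cons]
    by_cases hxa : x = a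
    · subst hxa
      simp [hnd.1]
    · have hax : ¬ a = x := fun h => hxa h.symm
      simp [hxa, hax]

theorem length_flatMap_pair (l : List Int) :
    (l.flatMap (fun i => [i, i])).length = 2 * l.length := by
  induction l with
  | nil => rfl
  | cons a t ih => simp [List.flatMap_cons, ih]; omega

theorem cond_iff_perm (n : Int) (hn : 0 ≤ n) (s : List Int) :
    ((s.length : Int) = 2 * n ∧
      ∀ i ∈ PySem.List.pyRange 1 (n + 1) 1, s.count i = 2) ↔
    s.Perm ((PySem.List.pyRange 1 (n + 1) 1).flatMap (fun i => [i, i])) := by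
  set r := PySem.List.pyRange 1 (n + 1) 1 with hr
  have hnd : r.Nodup := PySem.List.nodup_pyRange_one 1 (n + 1)
  have hlenr : r.length = n.toNat := by
    rw [hr, PySem.List.length_pyRange_one]; omega
  have hlenE : (r.flatMap (fun i => [i, i])).length = 2 * n.toNat := by
    rw [length_flatMap_pair, hlenr]
  constructor
  · rintro ⟨hlen, hcnt⟩
    have hsub : (r.flatMap (fun i => [i, i])).Subperm s := by
      rw [List.subperm_ext_iff]
      intro x hx
      rcases List.mem_flatMap.mp hx with ⟨y, hy, hxy⟩
      simp at hxy; subst hxy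
      rw [count_flatMap_pair r hnd x, if_pos hy, hcnt x hy]
    exact (hsub.perm_of_length_le (by omega)).symm
  · intro hperm
    constructor
    · have := hperm.length_eq
      omega
    · intro i hi
      rw [hperm.count_eq, count_flatMap_pair r hnd i, if_pos hi]

theorem sortedEq_iff_perm (n : Int) (s : List Int) :
    (PySem.List.sorted s (fun x => x) =
       (PySem.List.pyRange 1 (n + 1) 1).flatMap (fun i => [i, i])) ↔
    s.Perm ((PySem.List.pyRange 1 (n + 1) 1).flatMap (fun i => [i, i])) := by
  set r := PySem.List.pyRange 1 (n + 1) 1 with hr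
  have hpw : (r.flatMap (fun i => [i, i])).Pairwise (· ≤ ·) :=
    flatMap_pair_pairwise r (PySem.List.pairwise_lt_pyRange_one 1 (n + 1))
  constructor
  · intro h
    have := PySem.List.sorted_perm s (fun x => x) false
    rw [h] at this
    exact this.symm
  · intro hperm
    exact PySem.List.sorted_id_eq_of_perm_of_pairwise s _ hperm.symm hpw

theorem expected_eq (n : Int) :
    PySem.List.sorted (PySem.List.pyRepeat (PySem.List.pyRange 1 (n + 1) 1) 2) (fun x => x) =
    (PySem.List.pyRange 1 (n + 1) 1).flatMap (fun i => [i, i]) := by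
  rw [pyRepeat_two]
  exact PySem.List.sorted_id_eq_of_perm_of_pairwise _ _
    (append_self_perm_flatMap _).symm
    (flatMap_pair_pairwise _ (PySem.List.pairwise_lt_pyRange_one 1 (n + 1)))

theorem pred_eq (n : Int) (hn : 0 ≤ n) (s : List Int) :
    (PySem.List.len s == 2 * n
        && (PySem.List.pyRange 1 (n + 1) 1).all (fun i => PySem.List.count s i == 2)) =
    (PySem.List.sorted s (fun x => x) ==
        PySem.List.sorted (PySem.List.pyRepeat (PySem.List.pyRange 1 (n + 1) 1) 2) (fun x => x)) := by
  rw [expected_eq n]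
  apply Bool.eq_iff_iff.mpr
  rw [Bool.and_eq_true, beq_iff_eq, beq_iff_eq, List.all_eq_true]
  rw [sortedEq_iff_perm n s, ← cond_iff_perm n hn s]
  simp [PySem.List.len_eq, PySem.List.count_eq]

-- ---- step-2 ranges ----

theorem pyRange_two_same (m : Int) (hm : m % 2 = 0) :
    PySem.List.pyRange 1 (m + 1) 2 = PySem.List.pyRange 1 m 2 := by
  rw [PySem.List.pyRange_of_pos _ _ (by norm_num : (0:Int) < 2),
    PySem.List.pyRange_of_pos _ _ (by norm_num : (0:Int) < 2)]
  congr 2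
  split <;> split <;> omega

theorem pyRange_two_snoc (m : Int) (hm : m % 2 = 1) (h1 : 1 ≤ m) :
    PySem.List.pyRange 1 (m + 1) 2 = PySem.List.pyRange 1 m 2 ++ [m] := by
  rw [PySem.List.pyRange_of_pos _ _ (by norm_num : (0:Int) < 2),
    PySem.List.pyRange_of_pos _ _ (by norm_num : (0:Int) < 2)]
  have h2 : (if (1:Int) < m + 1 then ((m + 1 - 1 + 2 - 1) / 2).toNat else 0) =
      (if (1:Int) < m then ((m - 1 + 2 - 1) / 2).toNat else 0) + 1 := by
    split <;> split <;> omega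
  rw [h2, List.range_succ, List.map_append]
  congr 1
  simp only [List.map_cons, List.map_nil]
  congr 2
  split <;> omega

-- ---- the keep scan ----

theorem keep_nosat (l : List Int) :
    ∀ (cnt : PySem.Dict Int Int) (acc : List Int),
      (∀ x, (l.count x : Int) + cnt.getD x 0 ≤ 2) →
      ∃ cnt', l.foldl keepStep (cnt, acc) = (cnt', acc ++ l) ∧
        ∀ x, cnt'.getD x 0 = cnt.getD x 0 + l.count x := by
  induction l with
  | nil => intro cnt acc _; exact ⟨cnt, by simp, by simp⟩
  | cons a t ih =>
    intro cnt acc h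
    have ha : cnt.getD a 0 < 2 := by
      have h1 := h a
      rw [List.count_cons_self] at h1
      push_cast at h1
      omega
    simp only [List.foldl_cons, keepStep, if_pos ha]
    have hip : ∀ x, ((t.count x : Int)) + (cnt.insert a (cnt.getD a 0 + 1)).getD x 0 ≤ 2 := by
      intro x
      rw [PySem.Dict.getD_insert]
      by_cases hxa : x = a
      · have h1 := h a
        rw [List.count_cons_self] at h1
        push_cast at h1
        rw [if_pos hxa, hxa]
        omega
      · have hax : (a == x) = false := by simp [Ne.symm hxa]
        have h1 := h x
        rw [List.count_cons] at h1
        simp only [hax, Bool.false_eq_true, if_false, Nat.add_zero] at h1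
        rw [if_neg hxa]
        omega
    obtain ⟨cnt', heq, hc⟩ := ih (cnt.insert a (cnt.getD a 0 + 1)) (acc ++ [a]) hip
    refine ⟨cnt', by simpa using heq, fun x => ?_⟩
    rw [hc x, PySem.Dict.getD_insert]
    by_cases hxa : x = a
    · subst hxa
      rw [if_pos rfl, List.count_cons_self]
      push_cast
      ring
    · have hax : (a == x) = false := by simp [Ne.symm hxa]
      simp [hxa, List.count_cons, hax]

theorem keep_sat_noop (k : Nat) (m : Int) :
    ∀ (cnt : PySem.Dict Int Int) (acc : List Int), ¬ cnt.getD m 0 < 2 →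
      (List.replicate k m).foldl keepStep (cnt, acc) = (cnt, acc) := by
  induction k with
  | zero => intro cnt acc _; rfl
  | succ k ih =>
    intro cnt acc h
    rw [List.replicate_succ]
    simp only [List.foldl_cons, keepStep, if_neg h]
    exact ih cnt acc h

theorem keep_pre_rep (pre : List Int) (m : Int) (k : Nat) (hk : 2 ≤ k)
    (cnt : PySem.Dict Int Int) (acc : List Int)
    (hc0 : ∀ x, cnt.getD x 0 = 0)
    (hle : ∀ x, (pre.count x : Int) ≤ 2) (hm : pre.count m = 0) :
    ∃ cnt', (pre ++ List.replicate k m).foldl keepStep (cnt, acc) =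
        (cnt', acc ++ pre ++ [m, m]) ∧
      ∀ x, cnt'.getD x 0 = if x = m then 2 else (pre.count x : Int) := by
  rw [List.foldl_append]
  obtain ⟨cnt1, heq1, hc1⟩ := keep_nosat pre cnt acc (fun x => by rw [hc0 x]; simpa using hle x)
  rw [heq1]
  obtain ⟨k', rfl⟩ : ∃ k', k = k' + 2 := ⟨k - 2, by omega⟩
  have hm1 : cnt1.getD m 0 = 0 := by rw [hc1 m, hc0 m, hm]; simp
  have step2 : (List.replicate (k' + 2) m) = m :: m :: List.replicate k' m := by
    simp [List.replicate_succ]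
  rw [step2]
  simp only [List.foldl_cons, keepStep, hm1]
  rw [if_pos (by omega : (0:Int) < 2)]
  simp only [PySem.Dict.getD_insert_self]
  rw [if_pos (by omega : (0:Int) + 1 < 2)]
  have : (0 : Int) + 1 + 1 = 2 := by norm_num
  rw [this]
  rw [keep_sat_noop k' m _ _ (by simp [PySem.Dict.getD_insert_self])]
  refine ⟨(cnt1.insert m (0 + 1)).insert m 2, by simp, fun x => ?_⟩
  by_cases hxm : x = m
  · subst hxm
    simp [PySem.Dict.getD_insert_self]
  · rw [if_neg hxm, PySem.Dict.getD_insert_of_ne _ _ _ hxm,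
      PySem.Dict.getD_insert_of_ne _ _ _ hxm, hc1 x, hc0 x]
    simp

-- ---- the pad loop ----

theorem padWhile_noop (cnt : PySem.Dict Int Int) (acc : List Int) (i : Int)
    (h : cnt.getD i 0 = 2) : padWhile cnt acc i = (cnt, acc) := by
  rw [padWhile]
  simp [h]

theorem padWhile_one (cnt : PySem.Dict Int Int) (acc : List Int) (i : Int)
    (h : cnt.getD i 0 = 1) : padWhile cnt acc i = (cnt.insert i 2, acc ++ [i]) := by
  rw [padWhile]
  rw [dif_pos (by omega : cnt.getD i 0 < 2), h]
  rw [padWhile]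
  rw [dif_neg (by simp [PySem.Dict.getD_insert_self])]
  norm_num

theorem pad_noop (r : List Int) :
    ∀ (cnt : PySem.Dict Int Int) (acc : List Int), (∀ i ∈ r, cnt.getD i 0 = 2) →
      r.foldl (fun p i => padWhile p.1 p.2 i) (cnt, acc) = (cnt, acc) := by
  induction r with
  | nil => intro cnt acc _; rfl
  | cons a t ih =>
    intro cnt acc h
    simp only [List.foldl_cons]
    rw [padWhile_noop cnt acc a (h a (by simp))]
    exact ih cnt acc (fun i hi => h i (by simp [hi]))

-- ---- initial counter ----

theorem cnt0_zero (l : List Int) :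
    ∀ (d : PySem.Dict Int Int), (∀ x, d.getD x 0 = 0) →
      ∀ x, (l.foldl (fun d i => d.insert i 0) d).getD x 0 = 0 := by
  induction l with
  | nil => intro d h x; exact h x
  | cons a t ih =>
    intro d h x
    simp only [List.foldl_cons]
    refine ih _ (fun y => ?_) x
    rw [PySem.Dict.getD_insert]
    split <;> simp [h]

-- ---- fixCounts on already-valid input ----

theorem getD_empty_zero (x : Int) :
    (PySem.Dict.empty : PySem.Dict Int Int).getD x 0 = 0 := by
  simp [PySem.Dict.getD, PySem.Dict.get?, PySem.Dict.empty]

theorem fixCounts_eq_self (n : Int) (out : List Int)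
    (h : out.Perm ((PySem.List.pyRange 1 (n + 1) 1).flatMap (fun i => [i, i]))) :
    fixCounts n out = out := by
  have hnd := PySem.List.nodup_pyRange_one 1 (n + 1)
  have hcnt : ∀ x, out.count x =
      if x ∈ PySem.List.pyRange 1 (n + 1) 1 then 2 else 0 := fun x => by
    rw [h.count_eq, count_flatMap_pair _ hnd x]
  set cnt0 : PySem.Dict Int Int := (PySem.List.pyRange 1 (n + 1) 1).foldl
      (fun d i => d.insert i 0) PySem.Dict.empty with hcnt0
  have hc0 : ∀ x, cnt0.getD x 0 = 0 := cnt0_zero _ _ getD_empty_zero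
  obtain ⟨cnt', heq, hcd⟩ := keep_nosat out cnt0 ([] : List Int) (fun x => by
    rw [hc0 x, hcnt x]; split <;> norm_num)
  simp only [fixCounts]
  rw [heq, pad_noop _ _ _ (fun i hi => by
    rw [hcd i, hc0 i, hcnt i, if_pos hi]; norm_num)]
  simp

theorem slice_full (l : List Int) (m : Int) (hm : 0 ≤ m) (h : l.length = m.toNat) :
    PySem.List.slice l none (some m) = l := by
  rw [PySem.List.slice_to l hm, ← h, List.take_length]

-- ---- candidate equalities ----

theorem rainbow_eq (n : Int) (hn : 0 ≤ n) : motifRainbow n = altRainbow n := by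
  unfold motifRainbow altRainbow
  rw [PySem.List.pyRange_one_append 1 (n + 1) (2 * n + 1) (by omega) (by omega),
    List.map_append]
  congr 1
  · rw [List.map_congr_left (fun k hk => ?_), List.map_id]
    rw [PySem.List.mem_pyRange_one] at hk
    rw [if_pos (by omega)]
    rfl
  · rw [PySem.List.pyRange_neg_one_eq_reverse]
    norm_num
    apply List.ext_getElem
    · simp [PySem.List.length_pyRange_one]
      omega
    · intro i h1 h2
      have hi : i < n.toNat := by
        simp [PySem.List.length_pyRange_one] at h1
        omega
      rw [List.getElem_map, PySem.List.getElem_pyRange_one, List.getElem_reverse,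
        PySem.List.getElem_pyRange_one]
      rw [if_neg (by omega)]
      simp [PySem.List.length_pyRange_one]
      omega

theorem doubled_eq (n : Int) :
    motifDoubled n = altTwoOfEach (PySem.List.pyRange 1 (n + 1) 1) := by
  unfold motifDoubled altTwoOfEach
  rw [PySem.List.foldl_append_eq_flatMap (fun i => [i, i]) _ []]
  rfl

theorem inter_perm (k : Nat) :
    ((PySem.List.pyRange 1 (2 * (k : Int)) 2).flatMap (fun i => [i, i + 1, i, i + 1])).Perm
      ((PySem.List.pyRange 1 (2 * (k : Int) + 1) 1).flatMap (fun i => [i, i])) := by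
  induction k with
  | zero =>
    rw [PySem.List.pyRange_one_eq_nil (by norm_num)]
    rw [show (2 * ((0:Nat) : Int)) = 0 by norm_num,
      PySem.List.pyRange_of_pos _ _ (by norm_num : (0:Int) < 2)]
    simp
  | succ k ih =>
    have hcast : (2 * ((k + 1 : Nat) : Int)) = 2 * (k : Int) + 1 + 1 := by push_cast; ring
    rw [hcast]
    rw [pyRange_two_snoc (2 * (k : Int) + 1) (by omega) (by omega),
      pyRange_two_same (2 * (k : Int)) (by omega)]
    rw [show (2 * (k : Int) + 1 + 1 + 1) = (2 * (k : Int) + 1) + 1 + 1 by ring]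
    rw [PySem.List.pyRange_one_succ_right (by omega), PySem.List.pyRange_one_succ_right (by omega)]
    simp only [List.flatMap_append, List.flatMap_cons, List.flatMap_nil, List.append_nil]
    rw [List.append_assoc]
    exact List.Perm.append ih
      (List.Perm.cons _ (List.Perm.swap (2 * (k : Int) + 1) (2 * (k : Int) + 1 + 1) _))

theorem interleave_eq (n : Int) (hn : 0 ≤ n) : motifInterleave n = altInterleave n := by
  simp only [motifInterleave, altInterleave, mod_two]
  by_cases hpar : n % 2 = 0
  · -- even n: the range already yields exactly two of each label
    obtain ⟨k, hk⟩ : ∃ k : Nat, n = 2 * (k : Int) := ⟨(n / 2).toNat, by omega⟩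
    rw [pyRange_two_same n hpar]
    rw [PySem.List.foldl_congr_mem (PySem.List.pyRange 1 n 2) _
      (fun out i => out ++ [i, i + 1, i, i + 1]) []
      (by intro acc i hi
          rw [PySem.List.mem_pyRange_iff_of_pos (by norm_num)] at hi
          rw [if_pos (by omega)])]
    rw [PySem.List.foldl_append_eq_flatMap (fun i => [i, i + 1, i, i + 1])
      (PySem.List.pyRange 1 n 2) [], List.nil_append]
    have hperm := inter_perm k
    rw [← hk] at hperm
    rw [fixCounts_eq_self n _ hperm]
    rw [slice_full _ _ (by omega)
      (by rw [hperm.length_eq, length_flatMap_pair, PySem.List.length_pyRange_one]; omega)]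
    rw [if_neg (by omega)]
    simp
  · -- odd n: the last group [n,n,n,n] is trimmed to [n,n] by the count fix
    have hpar1 : n % 2 = 1 := by omega
    have h1 : (1 : Int) ≤ n := by omega
    rw [pyRange_two_snoc n hpar1 h1, List.foldl_append]
    rw [PySem.List.foldl_congr_mem (PySem.List.pyRange 1 n 2) _
      (fun out i => out ++ [i, i + 1, i, i + 1]) []
      (by intro acc i hi
          rw [PySem.List.mem_pyRange_iff_of_pos (by norm_num)] at hi
          rw [if_pos (by omega)])]
    rw [PySem.List.foldl_append_eq_flatMap (fun i => [i, i + 1, i, i + 1])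
      (PySem.List.pyRange 1 n 2) [], List.nil_append]
    set good : List Int := (PySem.List.pyRange 1 n 2).flatMap (fun i => [i, i + 1, i, i + 1])
      with hgood
    obtain ⟨k, hk⟩ : ∃ k : Nat, n - 1 = 2 * (k : Int) := ⟨((n - 1) / 2).toNat, by omega⟩
    have hperm : good.Perm ((PySem.List.pyRange 1 n 1).flatMap (fun i => [i, i])) := by
      have := inter_perm k
      rw [← hk, show (n - 1 + 1) = n by ring] at this
      rw [hgood, show n = (n - 1) + 1 by ring, pyRange_two_same (n - 1) (by omega),
        show (n - 1 + 1) = n by ring]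
      exact this
    have hnd : (PySem.List.pyRange 1 n 1).Nodup := PySem.List.nodup_pyRange_one 1 n
    have hcnt : ∀ x, good.count x = if x ∈ PySem.List.pyRange 1 n 1 then 2 else 0 :=
      fun x => by rw [hperm.count_eq, count_flatMap_pair _ hnd x]
    have hstep : List.foldl
        (fun out i => out ++ [i, if i + 1 ≤ n then i + 1 else i, i,
          if i + 1 ≤ n then i + 1 else i]) good [n]
        = good ++ List.replicate 4 n := by
      simp only [List.foldl_cons, List.foldl_nil]
      rw [if_neg (by omega)]
      rfl
    rw [hstep]
    simp only [fixCounts]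
    set cnt0 : PySem.Dict Int Int := (PySem.List.pyRange 1 (n + 1) 1).foldl
        (fun d i => d.insert i 0) PySem.Dict.empty with hcnt0
    have hc0 : ∀ x, cnt0.getD x 0 = 0 := cnt0_zero _ _ getD_empty_zero
    obtain ⟨cnt', heq, hcd⟩ := keep_pre_rep good n 4 (by norm_num) cnt0 [] hc0
      (fun x => by rw [hcnt x]; split <;> norm_num)
      (by rw [hcnt n, if_neg (by rw [PySem.List.mem_pyRange_one]; omega)])
    rw [heq]
    rw [pad_noop _ _ _ (fun i hi => by
      rw [PySem.List.mem_pyRange_one] at hi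
      rw [hcd i]
      by_cases hin : i = n
      · rw [if_pos hin]
      · rw [if_neg hin, hcnt i, if_pos (by rw [PySem.List.mem_pyRange_one]; omega)]
        norm_num)]
    simp only [List.nil_append]
    rw [slice_full _ _ (by omega)
      (by
        have := hperm.length_eq
        rw [length_flatMap_pair, PySem.List.length_pyRange_one] at this
        simp [this]
        omega)]
    rw [if_pos (by omega)]

theorem zipper_eq (n : Int) (hn : 0 ≤ n) : motifZipper n = altZipper n := by
  simp only [motifZipper, altZipper, mod_two, floordiv_two]
  rw [PySem.List.foldl_append_eq_flatMap (fun i => [i, n - i + 1, i, n - i + 1])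
    (PySem.List.pyRange 1 (n / 2 + 1) 1) [], List.nil_append]
  have hlen : ((PySem.List.pyRange 1 (n / 2 + 1) 1).flatMap
      (fun i => [i, n - i + 1, i, n - i + 1])).length = 4 * (n / 2).toNat := by
    rw [List.length_flatMap]
    rw [List.map_congr_left
        (fun x _ => (by simp : ([x, n - x + 1, x, n - x + 1] : List Int).length = 4)),
      List.map_const', List.sum_replicate, smul_eq_mul, PySem.List.length_pyRange_one]
    omega
  by_cases hpar : n % 2 = 0
  · rw [if_neg (by omega), if_neg (by omega)]
    rw [slice_full _ _ (by omega) (by rw [hlen]; omega)]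
    simp
  · rw [if_pos (by omega), if_pos (by omega), PySem.List.pyRepeat_singleton]
    rw [slice_full _ _ (by omega)
      (by rw [List.length_append, hlen]; simp; omega)]
    simp [List.replicate]

-- ---- the ladder while-loop ----

theorem lw_last (n : Int) (out : List Int) (_h1 : 1 ≤ n)
    (hlen : (out.length : Int) = 2 * n - 2) :
    ladderWhile n out n n = out ++ [n, n] := by
  rw [ladderWhile, dif_pos (by omega)]
  dsimp only
  rw [if_pos (le_refl n), if_pos (by omega : n + 1 > n)]
  rw [ladderWhile, dif_neg (by simp; omega)]

theorem lw_main (n : Int) (d : Nat) :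
    ∀ (a : Int) (out : List Int), (n - 1 - a).toNat = d → 1 ≤ a → a + 1 ≤ n →
      (out.length : Int) = 2 * (a - 1) →
      ladderWhile n out a (a + 1) =
        out ++ (PySem.List.pyRange a n 1).flatMap (fun k => [k, k + 1]) ++ [n, n] := by
  induction d with
  | zero =>
    intro a out hd ha1 han hlen
    have haeq : a + 1 = n := by omega
    rw [ladderWhile, dif_pos (by omega)]
    dsimp only
    rw [if_pos han, if_neg (by omega : ¬ a + 1 > n), if_pos (by omega : a + 1 + 1 > n)]
    rw [haeq]
    rw [lw_last n _ (by omega) (by simp; omega)]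
    rw [show PySem.List.pyRange a n 1 = [a] by
      rw [← haeq, PySem.List.pyRange_one_singleton]]
    simp [haeq]
  | succ d ih =>
    intro a out hd ha1 han hlen
    have hlt : a + 1 < n := by omega
    rw [ladderWhile, dif_pos (by omega)]
    dsimp only
    rw [if_pos han, if_neg (by omega : ¬ a + 1 > n), if_neg (by omega : ¬ a + 1 + 1 > n)]
    rw [ih (a + 1) _ (by omega) (by omega) (by omega) (by simp; omega)]
    rw [PySem.List.pyRange_one_cons (by omega : a < n), List.flatMap_cons]
    simp [List.append_assoc]

theorem flatMap_consec (d : Nat) :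
    ∀ (a b : Int), a < b → (b - a).toNat = d + 1 →
      (PySem.List.pyRange a b 1).flatMap (fun k => [k, k + 1]) =
        a :: (PySem.List.pyRange (a + 1) b 1).flatMap (fun k => [k, k]) ++ [b] := by
  induction d with
  | zero =>
    intro a b hab hd
    have : b = a + 1 := by omega
    subst this
    rw [PySem.List.pyRange_one_singleton, PySem.List.pyRange_one_eq_nil (le_refl _)]
    simp
  | succ d ih =>
    intro a b hab hd
    rw [PySem.List.pyRange_one_cons hab, List.flatMap_cons,
      ih (a + 1) b (by omega) (by omega),
      PySem.List.pyRange_one_cons (by omega : a + 1 < b), List.flatMap_cons]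
    simp

theorem ladder_eq (n : Int) (hn : 0 ≤ n) : motifLadder n = altLadder n := by
  simp only [motifLadder, altLadder]
  by_cases h0 : n = 0
  · subst h0
    rw [ladderWhile, dif_neg (by simp only [List.length_nil]; omega)]
    rw [if_neg (by omega : ¬ (1:Int) ≤ 0)]
    simp only [fixCounts, PySem.List.pyRange_one_eq_nil (by norm_num : (0:Int) + 1 ≤ 1)]
    simp only [List.foldl_nil]
    rw [PySem.List.slice_to _ (by norm_num : (0:Int) ≤ 2 * 0)]
    simp
  by_cases h1 : n = 1
  · subst h1
    rw [ladderWhile, dif_pos (by simp)]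
    dsimp only
    rw [if_neg (by norm_num : ¬ (2:Int) ≤ 1), if_pos (by norm_num : (1:Int) + 1 > 1),
      if_pos (by norm_num : (2:Int) + 1 > 1)]
    rw [ladderWhile, dif_neg (by simp)]
    rw [fixCounts_eq_self 1 _ (by
      rw [PySem.List.pyRange_one_singleton]
      simp)]
    rw [slice_full _ _ (by norm_num) (by simp)]
    rw [if_pos (le_refl 1)]
    rw [PySem.List.pyRange_one_eq_nil (by norm_num)]
    simp [altTwoOfEach]
  · -- n ≥ 2
    have h2 : 2 ≤ n := by omega
    have hlw := lw_main n (n - 2).toNat 1 [] (by omega) (le_refl 1) (by omega) (by simp)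
    rw [show (1:Int) + 1 = 2 from by norm_num] at hlw
    rw [hlw, List.nil_append]
    rw [flatMap_consec (n - 2).toNat 1 n (by omega) (by omega)]
    rw [show (1:Int) + 1 = 2 from by norm_num]
    set mid : List Int := (PySem.List.pyRange 2 n 1).flatMap (fun k => [k, k]) with hmid
    have hnd : (PySem.List.pyRange 2 n 1).Nodup := PySem.List.nodup_pyRange_one 2 n
    have hcnt : ∀ x, ((1 : Int) :: mid).count x =
        (if x = 1 then 1 else 0) + (if x ∈ PySem.List.pyRange 2 n 1 then 2 else 0) := by
      intro x
      rw [List.count_cons, hmid, count_flatMap_pair _ hnd x]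
      by_cases hx1 : x = 1
      · rw [if_pos hx1, if_neg (by rw [PySem.List.mem_pyRange_one]; omega)]
        simp [hx1]
      · have : ((1 : Int) == x) = false := by simp [Ne.symm hx1]
        rw [if_neg hx1, this]
        simp
    have hshape : (1 : Int) :: mid ++ [n] ++ [n, n] =
        ((1 : Int) :: mid) ++ List.replicate 3 n := by simp [List.replicate]
    rw [hshape]
    simp only [fixCounts]
    set cnt0 : PySem.Dict Int Int := (PySem.List.pyRange 1 (n + 1) 1).foldl
        (fun d i => d.insert i 0) PySem.Dict.empty with hcnt0
    have hc0 : ∀ x, cnt0.getD x 0 = 0 := cnt0_zero _ _ getD_empty_zero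
    obtain ⟨cnt', heq, hcd⟩ := keep_pre_rep ((1 : Int) :: mid) n 3 (by norm_num) cnt0 [] hc0
      (fun x => by
        rw [hcnt x]
        by_cases hx1 : x = 1
        · rw [if_pos hx1, if_neg (by rw [hx1, PySem.List.mem_pyRange_one]; omega :
            ¬ x ∈ PySem.List.pyRange 2 n 1)]
          omega
        · rw [if_neg hx1]
          split <;> omega)
      (by
        have := hcnt n
        rw [if_neg (by omega : ¬ n = 1),
          if_neg (by rw [PySem.List.mem_pyRange_one]; omega : ¬ n ∈ PySem.List.pyRange 2 n 1)] at this
        omega)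
    rw [heq]
    rw [PySem.List.pyRange_one_cons (by omega : (1 : Int) < n + 1), List.foldl_cons]
    have hcd1 : cnt'.getD 1 0 = 1 := by
      rw [hcd 1, if_neg (by omega), hcnt 1, if_pos rfl,
        if_neg (by rw [PySem.List.mem_pyRange_one]; omega)]
      norm_num
    rw [padWhile_one _ _ _ hcd1]
    rw [pad_noop _ _ _ (fun i hi => by
      rw [PySem.List.mem_pyRange_one] at hi
      rw [PySem.Dict.getD_insert_of_ne _ _ _ (by omega : i ≠ 1), hcd i]
      by_cases hin : i = n
      · rw [if_pos hin]
      · rw [if_neg hin, hcnt i, if_neg (by omega),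
          if_pos (by rw [PySem.List.mem_pyRange_one]; omega)]
        norm_num)]
    have hmlen : mid.length = 2 * (n - 2).toNat := by
      rw [hmid, length_flatMap_pair, PySem.List.length_pyRange_one]
    rw [slice_full _ _ (by omega) (by simp [hmlen]; omega)]
    rw [if_pos (by omega)]
    rw [PySem.List.pyRange_one_succ_right (by omega : 2 ≤ n)]
    simp only [altTwoOfEach, List.flatMap_append, ← hmid]
    simp

-- ===== VERDICT (by name: the statement is the Claim_ definition above) =====
theorem motif_seeds_spec : Claim_equal_motif_seeds := by
  intro n _ hn
  show motif_seeds n = motif_seeds_alt n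
  unfold motif_seeds motif_seeds_alt
  rw [PySem.List.foldl_append_if_eq_filter, List.nil_append,
    zip_self_flatMap, rainbow_eq n hn, doubled_eq n, interleave_eq n hn,
    zipper_eq n hn, ladder_eq n hn, ← pyRepeat_two]
  exact List.filter_congr (fun s _ => pred_eq n hn s)
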